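-- pv_equiv track=rewrite | github.com/rg98/aoc2024 | 2-2.py | check_save
-- ===== SOURCE A (Python) =====
-- def check_save(l):
--     if l[0] > 0:
--         for n in l:
--             if n < 1 or n > 3:
--                 return 0
--         return 1
--     elif l[0] < 0:
--         for n in l:
--             if n < -3 or n > -1:
--                 return 0
--         return 1
--     else:
--         return 0
-- ===== SOURCE B (Python) =====
-- def check_save(l):
--     s = set(l)
--     if s and (s <= {1, 2, 3} or s <= {-1, -2, -3}):
--         return 1
--     return 0
-- ===== Notes on version B (the rewrite author's own statement) =====
-- stated objective: alternative
-- what changed: Drops A's sign dispatch on l[0] and its two early-exit scan loops entirely: B builds set(l) once and tests nonemptiness plus subset inclusion in one of the two constant valid sets {1,2,3} / {-1,-2,-3}.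
import Mathlib
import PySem

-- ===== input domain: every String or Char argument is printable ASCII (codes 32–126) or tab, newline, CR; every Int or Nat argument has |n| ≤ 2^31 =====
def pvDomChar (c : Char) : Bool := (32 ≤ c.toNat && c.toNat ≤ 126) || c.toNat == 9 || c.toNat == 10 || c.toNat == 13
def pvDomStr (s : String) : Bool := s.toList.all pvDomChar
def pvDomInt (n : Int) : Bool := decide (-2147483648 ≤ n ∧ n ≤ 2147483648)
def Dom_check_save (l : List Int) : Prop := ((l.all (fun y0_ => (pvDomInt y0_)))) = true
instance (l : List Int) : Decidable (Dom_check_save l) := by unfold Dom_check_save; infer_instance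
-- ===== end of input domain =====

-- B drops A's sign dispatch on l[0] and its two early-exit scan loops: it builds set(l) once
-- and tests nonemptiness plus subset inclusion in {1,2,3} or {-1,-2,-3}; objective: alternative.
-- ===== PORT A =====
-- the 'for n in l: if n < 1 or n > 3: return 0' loop of the positive branch
def checkPosLoop : List Int → Int
  | [] => 1
  | n :: t => if n < 1 ∨ n > 3 then 0 else checkPosLoop t

-- the 'for n in l: if n < -3 or n > -1: return 0' loop of the negative branch
def checkNegLoop : List Int → Int
  | [] => 1
  | n :: t => if n < -3 ∨ n > -1 then 0 else checkNegLoop t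

def check_save (l : List Int) : Int :=
  match PySem.List.pyGet? l 0 with
  | none => 0   -- l[0] raises IndexError: excluded by Pre_check_save
  | some h =>
    if h > 0 then checkPosLoop l
    else if h < 0 then checkNegLoop l
    else 0

-- ===== PORT B =====
def check_save_alt (l : List Int) : Int :=
  let s : PySem.Set Int := PySem.Set.ofList l
  if s ≠ [] ∧ (PySem.Set.issubset s [1, 2, 3] ∨ PySem.Set.issubset s [-1, -2, -3]) then 1
  else 0

-- ===== PRECONDITION & SPEC =====
-- A raises IndexError at l[0] on the empty list; Pre_ excludes exactly that.
def Pre_check_save (l : List Int) : Prop := l ≠ []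
instance (l : List Int) : Decidable (Pre_check_save l) := by unfold Pre_check_save; infer_instance
def pvWitness_check_save : List Int := ([1, 2, 3])
def Spec_check_save (l : List Int) (out : Int) : Prop := out = check_save_alt l
instance (l : List Int) (out : Int) : Decidable (Spec_check_save l out) := by unfold Spec_check_save; infer_instance

-- ===== CLAIM (what is proved, stated in full; the proofs are below) =====
def Claim_equal_check_save : Prop := ∀ (l : List Int), Dom_check_save l → Pre_check_save l → Spec_check_save l (check_save l)

-- ===== LEMMAS AND PROOFS =====

theorem checkPosLoop_eq (l : List Int) :
    checkPosLoop l = (if ∀ x ∈ l, 1 ≤ x ∧ x ≤ 3 then (1:Int) else 0) := by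
  induction l with
  | nil => simp [checkPosLoop]
  | cons n t ih =>
    by_cases h : n < 1 ∨ n > 3
    · rw [checkPosLoop, if_pos h, if_neg]
      intro hall
      have := hall n (by simp)
      omega
    · have hn : 1 ≤ n ∧ n ≤ 3 := by omega
      rw [checkPosLoop, if_neg h, ih]
      simp [hn]

theorem checkNegLoop_eq (l : List Int) :
    checkNegLoop l = (if ∀ x ∈ l, -3 ≤ x ∧ x ≤ -1 then (1:Int) else 0) := by
  induction l with
  | nil => simp [checkNegLoop]
  | cons n t ih =>
    by_cases h : n < -3 ∨ n > -1
    · rw [checkNegLoop, if_pos h, if_neg]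
      intro hall
      have := hall n (by simp)
      omega
    · have hn : -3 ≤ n ∧ n ≤ -1 := by omega
      rw [checkNegLoop, if_neg h, ih]
      simp [hn]

-- B's subset tests, read back as bounds on the original list's elements
theorem issubset_pos_iff (l : List Int) :
    PySem.Set.issubset (PySem.Set.ofList l) [1, 2, 3] = true ↔ ∀ x ∈ l, 1 ≤ x ∧ x ≤ 3 := by
  rw [PySem.Set.issubset_iff]
  constructor
  · intro h x hx
    have := h x (by rw [PySem.Set.mem_ofList]; exact hx)
    simp at this
    omega
  · intro h x hx
    rw [PySem.Set.mem_ofList] at hx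
    have := h x hx
    simp
    omega

theorem issubset_neg_iff (l : List Int) :
    PySem.Set.issubset (PySem.Set.ofList l) [-1, -2, -3] = true ↔ ∀ x ∈ l, -3 ≤ x ∧ x ≤ -1 := by
  rw [PySem.Set.issubset_iff]
  constructor
  · intro h x hx
    have := h x (by rw [PySem.Set.mem_ofList]; exact hx)
    simp at this
    omega
  · intro h x hx
    rw [PySem.Set.mem_ofList] at hx
    have := h x hx
    simp
    omega

theorem ofList_ne_nil (h : Int) (t : List Int) : PySem.Set.ofList (h :: t) ≠ [] := by
  intro hc
  have : h ∈ PySem.Set.ofList (h :: t) := by rw [PySem.Set.mem_ofList]; simp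
  rw [hc] at this
  exact absurd this (List.not_mem_nil)

-- ===== VERDICT (by name: the statement is the Claim_ definition above) =====
theorem check_save_spec : Claim_equal_check_save := by
  intro l _ hpre
  unfold Spec_check_save check_save check_save_alt
  obtain ⟨h, t, rfl⟩ := List.exists_cons_of_ne_nil hpre
  have hget : PySem.List.pyGet? (h :: t) 0 = some h := by
    simp [PySem.List.pyGet?, PySem.List.pyIdx?]
  rw [hget]
  simp only [ne_eq, ofList_ne_nil h t, not_false_eq_true, true_and]
  by_cases hp : h > 0
  · rw [if_pos hp, checkPosLoop_eq]
    by_cases hall : ∀ x ∈ h :: t, 1 ≤ x ∧ x ≤ 3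
    · rw [if_pos hall, if_pos]
      exact Or.inl ((issubset_pos_iff (h :: t)).2 hall)
    · rw [if_neg hall, if_neg]
      rintro (hs | hs)
      · exact hall ((issubset_pos_iff (h :: t)).1 hs)
      · have := ((issubset_neg_iff (h :: t)).1 hs) h (by simp)
        omega
  · by_cases hn : h < 0
    · rw [if_neg hp, if_pos hn, checkNegLoop_eq]
      by_cases hall : ∀ x ∈ h :: t, -3 ≤ x ∧ x ≤ -1
      · rw [if_pos hall, if_pos]
        exact Or.inr ((issubset_neg_iff (h :: t)).2 hall)
      · rw [if_neg hall, if_neg]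
        rintro (hs | hs)
        · have := ((issubset_pos_iff (h :: t)).1 hs) h (by simp)
          omega
        · exact hall ((issubset_neg_iff (h :: t)).1 hs)
    · rw [if_neg hp, if_neg hn, if_neg]
      rintro (hs | hs)
      · have := ((issubset_pos_iff (h :: t)).1 hs) h (by simp)
        omega
      · have := ((issubset_neg_iff (h :: t)).1 hs) h (by simp)
        omega
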